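-- pv_equiv track=rewrite | github.com/AlexMLourenco/Openpose-Gestures-Modality | test.py | get_keypoints
-- ===== SOURCE A (Python) =====
-- def get_keypoints(_array):
--
--     keypoints_pose = list({i:{"x":[],"y":[]}} for i in range(len(_array[0])//3))
--     for item in _array:
--         for k in range(len(keypoints_pose)):
--             j = k*3 + 1
--             keypoints_pose[k][k]["x"].append(item[k*3])
--             keypoints_pose[k][k]["y"].append(item[j])
--     return keypoints_pose
-- ===== SOURCE B (Python) =====
-- def get_keypoints(_array):
--     n = len(_array[0]) // 3
--     cols = list(zip(*_array))
--     return [{k: {"x": list(cols[3 * k]), "y": list(cols[3 * k + 1])}} for k in range(n)]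
-- ===== Notes on version B (the rewrite author's own statement) =====
-- stated objective: alternative
-- what changed: B first transposes the whole array once with zip(*_array) into a column table and then assembles each keypoint's entry by indexing two precomputed columns, instead of A's row-major loop that appends element by element into pre-built mutable dicts.
import Mathlib
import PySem

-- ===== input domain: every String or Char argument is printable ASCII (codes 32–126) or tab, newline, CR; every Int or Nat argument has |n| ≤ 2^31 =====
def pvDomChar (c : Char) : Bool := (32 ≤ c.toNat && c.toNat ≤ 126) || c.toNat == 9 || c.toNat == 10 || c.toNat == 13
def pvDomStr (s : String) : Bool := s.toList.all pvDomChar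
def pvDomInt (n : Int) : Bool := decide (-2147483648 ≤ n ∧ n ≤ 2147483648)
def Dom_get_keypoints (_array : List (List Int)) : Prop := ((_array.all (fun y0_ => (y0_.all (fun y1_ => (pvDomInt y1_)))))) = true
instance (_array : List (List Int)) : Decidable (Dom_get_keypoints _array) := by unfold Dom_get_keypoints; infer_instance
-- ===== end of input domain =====

-- B transposes the array once with zip(*) into a column table and builds each keypoint entry
-- from two precomputed columns, instead of A's row-major append accumulation into mutable dicts.

-- ===== PORT A =====
-- item[j] with j always a nonnegative in-range index on Pre_: (pyGet? j).getD 0 is exact there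
def pvItem (row : List Int) (j : Nat) : Int := (PySem.List.pyGet? row (j : Int)).getD 0

-- d[key] = mutated value, first matching key (keys are unique and always present here, so exact)
def pvAssocMod {K V : Type} [BEq K] (d : List (K × V)) (key : K) (f : V → V) : List (K × V) :=
  match d with
  | [] => []
  | (a, b) :: rest => if a == key then (a, f b) :: rest else (a, b) :: pvAssocMod rest key f

-- one iteration of 'for item in _array': the inner 'for k in range(len(keypoints_pose))' loop;
-- keypoints_pose[k][k]["x"].append(item[k*3]) then keypoints_pose[k][k]["y"].append(item[j])
def pvStep (n : Nat) (kp : List (List (Int × List (String × List Int)))) (item : List Int) :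
    List (List (Int × List (String × List Int))) :=
  (List.range n).foldl (fun kp k =>
    kp.modify k (fun d =>
      pvAssocMod
        (pvAssocMod d (Int.ofNat k) (fun inner => pvAssocMod inner "x" (fun xs => xs ++ [pvItem item (k * 3)])))
        (Int.ofNat k) (fun inner => pvAssocMod inner "y" (fun ys => ys ++ [pvItem item (k * 3 + 1)])))) kp

def get_keypoints (_array : List (List Int)) : List (List (Int × List (String × List Int))) :=
  -- len(_array[0]) // 3 : _array[0] raises on [] (excluded by Pre_); // on these naturals = Nat division
  _array.foldl (pvStep ((_array.headD []).length / 3))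
    ((List.range ((_array.headD []).length / 3)).map
      (fun i => [(Int.ofNat i, [("x", ([] : List Int)), ("y", ([] : List Int))])]))

-- ===== PORT B =====
-- zip(*rows): the j-th output tuple (for j below the shortest row length) collects the j-th
-- element of every row; exact transliteration of Python's zip over the unpacked rows
def pvZipStar (rows : List (List Int)) : List (List Int) :=
  (List.range (((rows.map List.length).min?).getD 0)).map
    (fun j => rows.map (fun r => pvItem r j))

-- cols[i] with i in range on Pre_: (pyGet? i).getD [] is exact there
def pvCol' (cols : List (List Int)) (i : Nat) : List Int :=
  (PySem.List.pyGet? cols (i : Int)).getD []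

def get_keypoints_alt (_array : List (List Int)) : List (List (Int × List (String × List Int))) :=
  let cols := pvZipStar _array
  (List.range ((_array.headD []).length / 3)).map (fun k =>
    [(Int.ofNat k, [("x", pvCol' cols (3 * k)), ("y", pvCol' cols (3 * k + 1))])])

-- ===== PRECONDITION & SPEC =====
-- Pre_ excludes exactly the inputs where the Python A raises IndexError: the empty list
-- (len(_array[0])) and arrays containing a row too short for some accessed column.
def Pre_get_keypoints (_array : List (List Int)) : Prop :=
  _array ≠ [] ∧ ∀ row ∈ _array, 3 * ((_array.headD []).length / 3) ≤ row.length + 1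
instance (_array : List (List Int)) : Decidable (Pre_get_keypoints _array) := by
  unfold Pre_get_keypoints; infer_instance
def pvWitness_get_keypoints : List (List Int) := [[1, 2, 3], [4, 5, 6]]
def Spec_get_keypoints (_array : List (List Int)) (out : List (List (Int × List (String × List Int)))) : Prop := out = get_keypoints_alt _array
instance (_array : List (List Int)) (out : List (List (Int × List (String × List Int)))) : Decidable (Spec_get_keypoints _array out) := by unfold Spec_get_keypoints; infer_instance

-- ===== CLAIM =====
def Claim_equal_get_keypoints : Prop := ∀ (_array : List (List Int)), Dom_get_keypoints _array → Pre_get_keypoints _array → Spec_get_keypoints _array (get_keypoints _array)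

-- ===== LEMMAS AND PROOFS =====
-- the column state after the rows `done` have been processed
def pvCol (n : Nat) (done : List (List Int)) : List (List (Int × List (String × List Int))) :=
  (List.range n).map (fun k =>
    [(Int.ofNat k, [("x", done.map (fun row => pvItem row (3 * k))),
                    ("y", done.map (fun row => pvItem row (3 * k + 1)))])])

theorem pvStep_col (n : Nat) (done : List (List Int)) (item : List Int) :
    pvStep n (pvCol n done) item = pvCol n (done ++ [item]) := by
  unfold pvStep pvCol
  have key : ∀ m, m ≤ n →
      (List.range m).foldl (fun kp k =>
        kp.modify k (fun d =>
          pvAssocMod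
            (pvAssocMod d (Int.ofNat k) (fun inner => pvAssocMod inner "x" (fun xs => xs ++ [pvItem item (k * 3)])))
            (Int.ofNat k) (fun inner => pvAssocMod inner "y" (fun ys => ys ++ [pvItem item (k * 3 + 1)]))))
        ((List.range n).map (fun k =>
          [(Int.ofNat k, [("x", done.map (fun row => pvItem row (3 * k))),
                          ("y", done.map (fun row => pvItem row (3 * k + 1)))])]))
      = (List.range n).map (fun k =>
          if k < m then
            [(Int.ofNat k, [("x", (done ++ [item]).map (fun row => pvItem row (3 * k))),
                            ("y", (done ++ [item]).map (fun row => pvItem row (3 * k + 1)))])]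
          else
            [(Int.ofNat k, [("x", done.map (fun row => pvItem row (3 * k))),
                            ("y", done.map (fun row => pvItem row (3 * k + 1)))])]) := by
    intro m hm
    induction m with
    | zero => simp
    | succ m ih =>
      rw [List.range_succ, List.foldl_append, ih (Nat.le_of_succ_le hm)]
      simp only [List.foldl_cons, List.foldl_nil]
      apply List.ext_getElem
      · simp [List.length_modify]
      · intro i h1 h2
        have hin : i < n := by simpa [List.length_modify] using h1
        by_cases hi : i = m
        · subst hi
          rw [List.getElem_modify_eq]
          · simp [pvAssocMod, Nat.mul_comm]
        · rw [List.getElem_modify_ne]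
          · simp only [List.getElem_map, List.getElem_range]
            by_cases h3 : i < m
            · simp [h3, (show i < m + 1 by omega)]
            · simp [h3, (show ¬ i < m + 1 by omega)]
          · omega
  have := key n le_rfl
  rw [this]
  apply List.map_congr_left
  intro k hk
  simp [List.mem_range.mp hk]

theorem pvFold_col (n : Nat) : ∀ (rest done : List (List Int)),
    rest.foldl (pvStep n) (pvCol n done) = pvCol n (done ++ rest) := by
  intro rest
  induction rest with
  | nil => simp
  | cons r rs ih =>
    intro done
    rw [List.foldl_cons, pvStep_col, ih]
    simp

-- under Pre_, every accessed column index is below the shortest row length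
theorem pvZipStar_get (a : List (List Int)) (j : Nat)
    (hj : j < ((a.map List.length).min?).getD 0) :
    pvCol' (pvZipStar a) j = a.map (fun r => pvItem r j) := by
  unfold pvCol' pvZipStar
  rw [PySem.List.pyGet?_natCast]
  rw [List.getElem?_map, List.getElem?_range hj]
  rfl

theorem pvMin_lengths (a : List (List Int)) (ha : a ≠ [])
    (h : ∀ row ∈ a, 3 * ((a.headD []).length / 3) ≤ row.length + 1) (j : Nat)
    (hj : j + 1 < 3 * ((a.headD []).length / 3)) :
    j < ((a.map List.length).min?).getD 0 := by
  obtain ⟨m, hm⟩ : ∃ m, (a.map List.length).min? = some m := by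
    cases a with
    | nil => exact absurd rfl ha
    | cons x xs => exact ⟨_, List.min?_cons⟩
  rw [hm]
  simp only [Option.getD_some]
  have hmem : m ∈ a.map List.length := List.min?_mem hm
  obtain ⟨row, hrow, hlen⟩ := List.mem_map.mp hmem
  have := h row hrow
  omega

-- ===== VERDICT =====
theorem get_keypoints_spec : Claim_equal_get_keypoints := by
  intro a _ hpre
  obtain ⟨ha, hrows⟩ := hpre
  unfold Spec_get_keypoints get_keypoints get_keypoints_alt
  have hA := pvFold_col ((a.headD []).length / 3) a []
  simp only [pvCol, List.map_nil] at hA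
  rw [hA]
  simp only [List.nil_append]
  apply List.map_congr_left
  intro k hk
  have hk' := List.mem_range.mp hk
  rw [pvZipStar_get a (3 * k) (pvMin_lengths a ha hrows (3 * k) (by omega)),
      pvZipStar_get a (3 * k + 1) (pvMin_lengths a ha hrows (3 * k + 1) (by omega))]
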